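-- pv_equiv track=rewrite | github.com/UWT-TME-310/TME_310_hwxx_template | .tests/hwXX_tests.py | build_answer_registry
-- ===== SOURCE A (Python) =====
-- def get_cell_tags(cell):
--     """Extract tags from a notebook cell."""
--     metadata = cell.get("metadata", {})
--     tags = metadata.get("tags", [])
--     return tags
--
-- def build_answer_registry(cells):
--     """Build a registry of answer cells for each subproblem section."""
--     required_subproblems = ["summarize", "plan", "script", "reflect"]
--     answer_registry = {}
--
--     for i, cell in enumerate(cells):
--         tags = get_cell_tags(cell)
--
--         for subproblem in required_subproblems:
--             if subproblem in tags:
--                 # Find the next subproblem or problem tag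
--                 next_section_idx = len(cells)
--
--                 for j in range(i + 1, len(cells)):
--                     next_tags = get_cell_tags(cells[j])
--                     if "problem" in next_tags or any(
--                         sp in next_tags for sp in required_subproblems
--                     ):
--                         next_section_idx = j
--                         break
--
--                 # Store answer cell indices for this subproblem
--                 answer_cells = list(range(i + 1, next_section_idx))
--                 answer_registry[f"{subproblem}_{i}"] = answer_cells
--
--     return answer_registry
-- ===== SOURCE B (Python) =====
-- def build_answer_registry(cells):
--     """Build a registry of answer cells for each subproblem section.
--
--     One backward pass precomputes, for every position, the index of the next
--     section boundary; each tagged cell is then handled in O(1).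
--     """
--     required_subproblems = ["summarize", "plan", "script", "reflect"]
--     tag_lists = [cell.get("metadata", {}).get("tags", []) for cell in cells]
--     n = len(cells)
--
--     def is_boundary(tags):
--         return "problem" in tags or any(sp in tags for sp in required_subproblems)
--
--     # nxt[i] = index of the first boundary cell at position >= i (or n)
--     nxt = [n] * (n + 1)
--     for i in range(n - 1, -1, -1):
--         nxt[i] = i if is_boundary(tag_lists[i]) else nxt[i + 1]
--
--     answer_registry = {}
--     for i, tags in enumerate(tag_lists):
--         for subproblem in required_subproblems:
--             if subproblem in tags:
--                 answer_registry[f"{subproblem}_{i}"] = list(range(i + 1, nxt[i + 1]))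
--     return answer_registry
-- ===== Notes on version B (the rewrite author's own statement) =====
-- stated objective: alternative
-- what changed: Instead of rescanning forward from every tagged cell to find the next section boundary, B precomputes the next-boundary index for every position in one backward pass and answers each tagged cell with an O(1) lookup.
import Mathlib
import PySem

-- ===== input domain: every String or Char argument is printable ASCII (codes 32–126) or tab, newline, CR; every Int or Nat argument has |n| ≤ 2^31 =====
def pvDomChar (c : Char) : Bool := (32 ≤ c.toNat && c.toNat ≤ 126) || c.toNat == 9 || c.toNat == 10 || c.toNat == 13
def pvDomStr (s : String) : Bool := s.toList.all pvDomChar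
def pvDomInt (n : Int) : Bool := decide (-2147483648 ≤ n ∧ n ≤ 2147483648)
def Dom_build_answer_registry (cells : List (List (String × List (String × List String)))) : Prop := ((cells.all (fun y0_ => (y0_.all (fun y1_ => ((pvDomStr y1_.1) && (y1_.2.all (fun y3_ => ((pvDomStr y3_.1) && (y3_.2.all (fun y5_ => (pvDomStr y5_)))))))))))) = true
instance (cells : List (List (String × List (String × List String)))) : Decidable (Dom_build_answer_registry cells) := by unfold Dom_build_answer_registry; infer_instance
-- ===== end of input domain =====

-- B replaces A's per-tag forward rescan for the next section boundary by a single
-- backward precomputation pass followed by an O(1) lookup per tagged cell (objective: alternative).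

-- ===== PORT A =====

-- get_cell_tags(cell): cell.get("metadata", {}).get("tags", [])  (shared module helper)
def pvTags (cell : List (String × List (String × List String))) : List String :=
  (PySem.Dict.mk ((PySem.Dict.mk cell).getD "metadata" [])).getD "tags" []

-- '"problem" in tags or any(sp in tags for sp in required_subproblems)'
def pvBoundary (tags : List String) : Bool :=
  tags.contains "problem" ||
    (["summarize", "plan", "script", "reflect"].any fun sp => tags.contains sp)

-- the inner 'for j in range(i+1, len(cells)) … break' search, as recursion over the suffix
def pvFindNextA (rest : List (List (String × List (String × List String))))
    (j : Int) (dflt : Int) : Int :=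
  match rest with
  | [] => dflt
  | c :: tl => if pvBoundary (pvTags c) then j else pvFindNextA tl (j + 1) dflt

-- the outer 'for i, cell in enumerate(cells)' loop
def pvLoopA (rest : List (List (String × List (String × List String))))
    (i : Int) (n : Int) (reg : PySem.Dict String (List Int)) :
    PySem.Dict String (List Int) :=
  match rest with
  | [] => reg
  | c :: tl =>
    let tags := pvTags c
    let reg' := ["summarize", "plan", "script", "reflect"].foldl
      (fun r sp =>
        if tags.contains sp then
          r.insert (sp ++ "_" ++ PySem.Int.toStr i)
            (PySem.List.pyRange (i + 1) (pvFindNextA tl (i + 1) n) 1)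
        else r) reg
    pvLoopA tl (i + 1) n reg'

def build_answer_registry (cells : List (List (String × List (String × List String)))) :
    List (String × List Int) :=
  (pvLoopA cells 0 (cells.length : Int) PySem.Dict.empty).items

-- ===== PORT B =====

-- the backward pass: nxt values for indices i, i+1, …, i+len (last entry = n)
def pvNxt (tagLists : List (List String)) (i : Int) : List Int :=
  match tagLists with
  | [] => [i]
  | ts :: rest =>
    let tail := pvNxt rest (i + 1)
    (if pvBoundary ts then i else tail.headD (i + 1)) :: tail

-- the forward 'for i, tags in enumerate(tag_lists)' loop, consuming nxt[i+1], nxt[i+2], …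
def pvEmitB (tagLists : List (List String)) (nxts : List Int) (i : Int)
    (reg : PySem.Dict String (List Int)) : PySem.Dict String (List Int) :=
  match tagLists, nxts with
  | ts :: rest, nx :: nxrest =>
    let reg' := ["summarize", "plan", "script", "reflect"].foldl
      (fun r sp =>
        if ts.contains sp then
          r.insert (sp ++ "_" ++ PySem.Int.toStr i) (PySem.List.pyRange (i + 1) nx 1)
        else r) reg
    pvEmitB rest nxrest (i + 1) reg'
  | _, _ => reg

def build_answer_registry_alt (cells : List (List (String × List (String × List String)))) :
    List (String × List Int) :=
  let tagLists := cells.map pvTags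
  (pvEmitB tagLists ((pvNxt tagLists 0).drop 1) 0 PySem.Dict.empty).items

-- ===== PRECONDITION & SPEC =====
def Spec_build_answer_registry (cells : List (List (String × List (String × List String)))) (out : List (String × List Int)) : Prop := out = build_answer_registry_alt cells
instance (cells : List (List (String × List (String × List String)))) (out : List (String × List Int)) : Decidable (Spec_build_answer_registry cells out) := by unfold Spec_build_answer_registry; infer_instance

-- ===== CLAIM (what is proved, stated in full; the proofs are below) =====
def Claim_equal_build_answer_registry : Prop := ∀ (cells : List (List (String × List (String × List String)))), Dom_build_answer_registry cells → Spec_build_answer_registry cells (build_answer_registry cells)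

-- ===== LEMMAS AND PROOFS =====

-- head of the backward pass at index i = A's forward search from i with default i + len
theorem pvNxt_headD (R : List (List (String × List (String × List String)))) :
    ∀ (i d : Int), (pvNxt (R.map pvTags) i).headD d = pvFindNextA R i (i + R.length) := by
  induction R with
  | nil => intro i d; simp [pvNxt, pvFindNextA]
  | cons c rest ih =>
    intro i d
    simp only [List.map_cons, pvNxt, pvFindNextA, List.headD_cons]
    by_cases h : pvBoundary (pvTags c) = true
    · simp [h]
    · simp only [h, if_false, Bool.false_eq_true]
      rw [ih (i + 1) (i + 1)]
      congr 1
      push_cast [List.length_cons]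
      ring

theorem pvLoopA_eq_pvEmitB (R : List (List (String × List (String × List String)))) :
    ∀ (i : Int) (reg : PySem.Dict String (List Int)),
      pvLoopA R i (i + R.length) reg
        = pvEmitB (R.map pvTags) ((pvNxt (R.map pvTags) i).drop 1) i reg := by
  induction R with
  | nil => intro i reg; simp [pvLoopA, pvNxt, pvEmitB]
  | cons c rest ih =>
    intro i reg
    have hcons : pvNxt (rest.map pvTags) (i + 1)
        = (pvNxt (rest.map pvTags) (i + 1)).headD 0 :: (pvNxt (rest.map pvTags) (i + 1)).drop 1 := by
      cases h : rest.map pvTags with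
      | nil => simp [pvNxt]
      | cons ts tl => simp [pvNxt]
    simp only [List.map_cons, pvNxt, List.drop_succ_cons, List.drop_zero]
    rw [hcons]
    simp only [pvLoopA, pvEmitB]
    rw [pvNxt_headD rest (i + 1) 0]
    have hn : i + ((c :: rest).length : Int) = (i + 1) + (rest.length : Int) := by
      push_cast [List.length_cons]; ring
    rw [hn, ih (i + 1)]

-- ===== VERDICT (by name: the statement is the Claim_ definition above) =====
theorem build_answer_registry_spec : Claim_equal_build_answer_registry := by
  intro cells _
  unfold Spec_build_answer_registry build_answer_registry build_answer_registry_alt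
  have := pvLoopA_eq_pvEmitB cells 0 PySem.Dict.empty
  rw [show ((cells.length : Int)) = 0 + (cells.length : Int) by ring, this]
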